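-- pv_equiv track=rewrite | github.com/bwesterb/ks | code/colorability.py | find_010coloring
-- ===== SOURCE A (Python) =====
-- def build_node_to_triangles(adj, triangles):
--     """ Build a node to triangle dictionary for a graph given by adj
--             with given triangles. """
--     node_to_triangles = dict()
--     for node in adj:
--         node_to_triangles[node] = set()
--     for triangle in triangles:
--         for node in triangle:
--             node_to_triangles[node].add(triangle)
--     return node_to_triangles
--
-- def find_triangles(adj):
--     """ Find triangles of the graph given by adj. """
--     triangles = set()
--     for p in adj:
--         for n1 in adj[p]:
--             for n2 in adj[p]:
--                 if n1 == n2: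
--                     continue
--                 if n1 in adj[n2]:
--                     key = tuple(sorted([n1, n2, p]))
--                     triangles.add(key)
--     return triangles
--
-- def find_010coloring(adj):
--     """ Tries to find a 010-coloring of the graph given by adj. """
--     triangles = find_triangles(adj)
--     node_to_triangles = build_node_to_triangles(adj, triangles)
--     mapping = {}
--     for node in adj:
--         mapping[node] = None
--     todo = list(adj)
--     todo.sort(key=lambda node: -len(adj[node]))
--     stack = [(mapping, tuple(todo))]
--     N = 0
--     while stack:
--         N += 1
--         mapping, todo = stack.pop()
--         if not todo:
--             return mapping
--         node = todo[0]
--         todo = todo[1:]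
--         can_be_true = True
--         can_be_false = True
--         for neighbour in adj[node]:
--             if mapping[neighbour] is True:
--                 can_be_true = False
--                 break
--         for triangle in node_to_triangles[node]:
--             other1, other2 = frozenset(triangle) - frozenset((node,))
--             if mapping[other1] is False and mapping[other2] is False:
--                 can_be_false = False
--             if mapping[other1] is True or mapping[other2] is True:
--                 can_be_true = False
--         if can_be_false:
--             new_mapping = dict(mapping)
--             new_mapping[node] = False
--             stack.append((new_mapping, todo))
--         if can_be_true:
--             new_mapping = dict(mapping)
--             new_mapping[node] = True
--             stack.append((new_mapping, todo))
-- ===== SOURCE B (Python) =====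
-- def find_010coloring(adj):
--     """ Tries to find a 010-coloring of the graph given by adj. """
--     # All triangle candidates as a flat list (duplicates are harmless: they are
--     # only consulted through all()-style feasibility tests below).
--     tris = [tuple(sorted((n1, n2, p)))
--             for p in adj for n1 in adj[p] for n2 in adj[p]
--             if n1 != n2 and n1 in adj[n2]]
--     order = sorted(adj, key=lambda v: -len(adj[v]))
--
--     def dfs(assign, todo):
--         if not todo:
--             return assign
--         v, rest = todo[0], todo[1:]
--         pairs = [[u for u in t if u != v] for t in tris if v in t]
--         ok_true = (all(assign[u] is not True for u in adj[v])
--                    and all(assign[a] is not True and assign[b] is not True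
--                            for a, b in pairs))
--         if ok_true:
--             r = dfs({**assign, v: True}, rest)
--             if r is not None:
--                 return r
--         if all(not (assign[a] is False and assign[b] is False) for a, b in pairs):
--             return dfs({**assign, v: False}, rest)
--         return None
--
--     return dfs({v: None for v in adj}, order)
-- ===== Notes on version B (the rewrite author's own statement) =====
-- stated objective: simpler
-- what changed: A's explicit-stack while-loop over two precomputed structures (a deduplicated triangle set plus a node-to-triangle-set dict) is replaced by a recursive DFS (True branch first, then False) over a flat list of triangle candidates that is filtered per node on the fly.
import Mathlib
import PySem

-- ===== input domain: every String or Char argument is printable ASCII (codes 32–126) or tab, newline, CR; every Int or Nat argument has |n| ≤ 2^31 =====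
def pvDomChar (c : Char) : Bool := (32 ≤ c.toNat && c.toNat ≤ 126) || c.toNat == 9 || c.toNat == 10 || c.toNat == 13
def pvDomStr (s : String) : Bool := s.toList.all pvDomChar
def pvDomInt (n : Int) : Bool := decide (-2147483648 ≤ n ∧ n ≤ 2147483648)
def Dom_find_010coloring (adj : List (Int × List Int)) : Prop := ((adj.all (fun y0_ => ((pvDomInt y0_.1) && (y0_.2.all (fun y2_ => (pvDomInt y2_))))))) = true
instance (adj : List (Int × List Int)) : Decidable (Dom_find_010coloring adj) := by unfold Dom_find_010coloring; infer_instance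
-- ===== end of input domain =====

-- B replaces A's explicit-stack backtracking over two precomputed structures (triangle set +
-- node-to-triangles dict) by a recursive DFS (True branch first) over a flat triangle-candidate
-- list filtered per node on the fly; same return value (neither mutates its argument).

-- ===== PORT A =====
def pvNeigh (d : PySem.Dict Int (List Int)) (x : Int) : List Int := d.getD x []

-- tuple(sorted([a, b, c]))
def pvSort3 (a b c : Int) : Int × Int × Int :=
  match PySem.List.sorted [a, b, c] (fun x => x) false with
  | [x, y, z] => (x, y, z)
  | _ => (a, b, c)   -- unreachable: sorted keeps length

-- find_triangles(adj)
def pvFindTriangles (d : PySem.Dict Int (List Int)) : PySem.Set (Int × Int × Int) :=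
  d.keys.foldl (fun tri p =>
    (pvNeigh d p).foldl (fun tri n1 =>
      (pvNeigh d p).foldl (fun tri n2 =>
        if n1 == n2 then tri
        else if (pvNeigh d n2).contains n1 then PySem.Set.add tri (pvSort3 n1 n2 p)
        else tri) tri) tri) PySem.Set.empty

def pvTriNodes (t : Int × Int × Int) : List Int := [t.1, t.2.1, t.2.2]

-- build_node_to_triangles(adj, triangles)
def pvBuildN2T (d : PySem.Dict Int (List Int)) (tris : List (Int × Int × Int)) :
    PySem.Dict Int (PySem.Set (Int × Int × Int)) :=
  let m := d.keys.foldl (fun m node => m.insert node PySem.Set.empty) PySem.Dict.empty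
  tris.foldl (fun m t =>
    (pvTriNodes t).foldl (fun m node =>
      m.modify node PySem.Set.empty (fun s => PySem.Set.add s t)) m) m

-- the two feasibility flags for `node`: returns (can_be_false, can_be_true)
def pvCanFlags (d : PySem.Dict Int (List Int))
    (n2t : PySem.Dict Int (PySem.Set (Int × Int × Int)))
    (mapping : PySem.Dict Int (Option Bool)) (node : Int) : Bool × Bool :=
  let ct := (pvNeigh d node).foldl
    (fun ct nb => if mapping.getD nb none == some true then false else ct) true
  (n2t.getD node []).foldl (fun fl t =>
    match (pvTriNodes t).filter (fun x => x != node) with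
    | [o1, o2] =>
      let cf := if mapping.getD o1 none == some false && mapping.getD o2 none == some false
                then false else fl.1
      let ct := if mapping.getD o1 none == some true || mapping.getD o2 none == some true
                then false else fl.2
      (cf, ct)
    | _ => fl) (true, ct)

-- weight of one stack entry, for termination of the while-loop
def pvStackW (e : PySem.Dict Int (Option Bool) × List Int) : Nat := 2 ^ (e.2.length + 1) - 1

-- the `while stack:` loop of A; the stack top is the list head (Python append/pop at the end)
def pvRunStack (d : PySem.Dict Int (List Int))
    (n2t : PySem.Dict Int (PySem.Set (Int × Int × Int))) :
    List (PySem.Dict Int (Option Bool) × List Int) → Option (PySem.Dict Int (Option Bool))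
  | [] => none
  | (mapping, todo) :: rest =>
    match todo with
    | [] => some mapping
    | node :: todo' =>
      let fl := pvCanFlags d n2t mapping node
      pvRunStack d n2t
        ((if fl.2 then [(mapping.insert node (some true), todo')] else []) ++
         (if fl.1 then [(mapping.insert node (some false), todo')] else []) ++ rest)
  termination_by s => (s.map pvStackW).sum
  decreasing_by
    have h1 : (1:Nat) ≤ 2 ^ (todo'.length + 1) := Nat.one_le_two_pow
    split_ifs <;> simp [pvStackW] <;> omega

def find_010coloring (adj : List (Int × List Int)) : Option (List (Int × Option Bool)) :=
  let d := PySem.Dict.ofList adj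
  let triangles := pvFindTriangles d
  let n2t := pvBuildN2T d triangles
  let mapping := d.keys.foldl (fun m node => m.insert node (none : Option Bool)) PySem.Dict.empty
  let todo := PySem.List.sorted d.keys (fun node => -((pvNeigh d node).length : Int)) false
  (pvRunStack d n2t [(mapping, todo)]).map PySem.Dict.items

-- ===== PORT B =====
-- tuple(sorted((n1, n2, p)))
def pvbTri (a b c : Int) : Int × Int × Int :=
  match PySem.List.sorted [a, b, c] (fun x => x) false with
  | [x, y, z] => (x, y, z)
  | _ => (a, b, c)   -- unreachable: sorted keeps length

-- the flat triangle-candidate list comprehension of Source B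
def pvbTris (d : PySem.Dict Int (List Int)) : List (Int × Int × Int) :=
  d.keys.flatMap (fun p =>
    (d.getD p []).flatMap (fun n1 =>
      ((d.getD p []).filter (fun n2 => n1 != n2 && (d.getD n2 []).contains n1)).map
        (fun n2 => pvbTri n1 n2 p)))

def pvbNodes (t : Int × Int × Int) : List Int := [t.1, t.2.1, t.2.2]

-- [u for u in t if u != v]; on a degenerate candidate Python's 2-unpacking raises (outside Pre_)
def pvbOthers (t : Int × Int × Int) (v : Int) : Int × Int :=
  match (pvbNodes t).filter (fun u => u != v) with
  | [a, b] => (a, b)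
  | _ => (v, v)

-- dfs(assign, todo) of Source B: try v := True first, then v := False
def pvbDfs (d : PySem.Dict Int (List Int)) (tris : List (Int × Int × Int)) :
    PySem.Dict Int (Option Bool) → List Int → Option (PySem.Dict Int (Option Bool))
  | assign, [] => some assign
  | assign, v :: rest =>
    let pairs := (tris.filter (fun t => (pvbNodes t).contains v)).map (fun t => pvbOthers t v)
    let okTrue :=
      (d.getD v []).all (fun u => assign.getD u none != some true) &&
      pairs.all (fun pr =>
        assign.getD pr.1 none != some true && assign.getD pr.2 none != some true)
    match (if okTrue then pvbDfs d tris (assign.insert v (some true)) rest else none) with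
    | some r => some r
    | none =>
      if pairs.all (fun pr =>
          !(assign.getD pr.1 none == some false && assign.getD pr.2 none == some false)) then
        pvbDfs d tris (assign.insert v (some false)) rest
      else none

def find_010coloring_alt (adj : List (Int × List Int)) : Option (List (Int × Option Bool)) :=
  let d := PySem.Dict.ofList adj
  let tris := pvbTris d
  let order := PySem.List.sorted d.keys (fun v => -((d.getD v []).length : Int)) false
  let assign0 := d.keys.foldl (fun m v => m.insert v (none : Option Bool)) PySem.Dict.empty
  (pvbDfs d tris assign0 order).map PySem.Dict.items

-- ===== PRECONDITION & SPEC =====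
-- Pre_ excludes inputs on which the Python raises — a neighbour that is not a key of adj
-- (KeyError on adj[n2] / mapping[neighbour]) or a self-looped node with a further neighbour
-- (the degenerate "triangle" it spawns makes the two-element unpacking raise ValueError);
-- in rare cases the search dead-ends before reaching the degenerate triangle and A returns
-- None — B returns None there too.
def Pre_find_010coloring (adj : List (Int × List Int)) : Prop :=
  ∀ k ∈ (PySem.Dict.ofList adj).keys, ∀ n ∈ (PySem.Dict.ofList adj).getD k [],
    n ∈ (PySem.Dict.ofList adj).keys ∧
    (k ∈ (PySem.Dict.ofList adj).getD k [] → n = k)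
instance (adj : List (Int × List Int)) : Decidable (Pre_find_010coloring adj) := by
  unfold Pre_find_010coloring; infer_instance

def pvWitness_find_010coloring : (List (Int × List Int)) := [(0, [1, 2]), (1, [0]), (2, [0])]

def Spec_find_010coloring (adj : List (Int × List Int)) (out : Option (List (Int × Option Bool))) : Prop := out = find_010coloring_alt adj
instance (adj : List (Int × List Int)) (out : Option (List (Int × Option Bool))) : Decidable (Spec_find_010coloring adj out) := by unfold Spec_find_010coloring; infer_instance

-- ===== CLAIM (what is proved, stated in full; the proofs are below) =====
def Claim_equal_find_010coloring : Prop := ∀ (adj : List (Int × List Int)), Dom_find_010coloring adj → Pre_find_010coloring adj → Spec_find_010coloring adj (find_010coloring adj)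

-- ===== LEMMAS AND PROOFS =====

-- A's search written as a recursion with A's flag computation (proof-side bridge)
def pvDfsA (d : PySem.Dict Int (List Int))
    (n2t : PySem.Dict Int (PySem.Set (Int × Int × Int))) :
    PySem.Dict Int (Option Bool) → List Int → Option (PySem.Dict Int (Option Bool))
  | m, [] => some m
  | m, node :: todo' =>
    let fl := pvCanFlags d n2t m node
    match (if fl.2 then pvDfsA d n2t (m.insert node (some true)) todo' else none) with
    | some r => some r
    | none => if fl.1 then pvDfsA d n2t (m.insert node (some false)) todo' else none

theorem pv_findSome_singleton {α β : Type} (f : α → Option β) (e : α) :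
    List.findSome? f [e] = f e := by
  rcases h : f e <;> simp [List.findSome?, h]

-- A's LIFO stack loop computes, entry by entry, the first success of the DFS over the stack.
theorem pvRunStack_eq_findSome (d : PySem.Dict Int (List Int))
    (n2t : PySem.Dict Int (PySem.Set (Int × Int × Int)))
    (s : List (PySem.Dict Int (Option Bool) × List Int)) :
    pvRunStack d n2t s = s.findSome? (fun e => pvDfsA d n2t e.1 e.2) := by
  induction s using pvRunStack.induct d n2t with
  | case1 => simp [pvRunStack]
  | case2 mapping rest => simp [pvRunStack, pvDfsA, List.findSome?]
  | case3 mapping rest node todo' fl ih =>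
    rw [pvRunStack]
    simp only [fl, dite_eq_ite] at ih ⊢
    rw [ih]
    rcases h2 : (pvCanFlags d n2t mapping node).2 <;>
      rcases h1 : (pvCanFlags d n2t mapping node).1 <;>
        simp [pvDfsA, List.findSome?, h1, h2] <;>
          rcases pvDfsA d n2t (mapping.insert node (some true)) todo' <;> simp

-- generic: a fold whose step adds P b to a monotone property F
theorem pv_foldl_prop_step {σ β : Type} (F : σ → Prop) (g : σ → β → σ) (P : β → Prop)
    (h : ∀ s b, F (g s b) ↔ F s ∨ P b) :
    ∀ (l : List β) (s : σ), F (l.foldl g s) ↔ F s ∨ ∃ b ∈ l, P b := by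
  intro l
  induction l with
  | nil => simp
  | cons x xs ih => intro s; rw [List.foldl_cons, ih, h]; simp; tauto

-- the ∃-characterisation both triangle collections share
def pvTriCond (d : PySem.Dict Int (List Int)) (t : Int × Int × Int) : Prop :=
  ∃ p ∈ d.keys, ∃ n1 ∈ d.getD p [], ∃ n2 ∈ d.getD p [],
    n1 ≠ n2 ∧ n1 ∈ d.getD n2 [] ∧ t = pvSort3 n1 n2 p

theorem pv_ft_inner (d : PySem.Dict Int (List Int)) (t : Int × Int × Int) (p n1 : Int)
    (s : PySem.Set (Int × Int × Int)) :
    t ∈ (pvNeigh d p).foldl (fun tri n2 =>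
        if n1 == n2 then tri
        else if (pvNeigh d n2).contains n1 then PySem.Set.add tri (pvSort3 n1 n2 p) else tri) s
      ↔ t ∈ s ∨ ∃ n2 ∈ pvNeigh d p, n1 ≠ n2 ∧ n1 ∈ pvNeigh d n2 ∧ t = pvSort3 n1 n2 p := by
  rw [pv_foldl_prop_step (fun s => t ∈ s) _
      (fun n2 => n1 ≠ n2 ∧ n1 ∈ pvNeigh d n2 ∧ t = pvSort3 n1 n2 p) ?_]
  intro s n2
  by_cases h1 : n1 = n2
  · simp [h1]
  · by_cases h2 : n1 ∈ pvNeigh d n2 <;>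
      simp [h1, h2, PySem.Set.mem_add]

theorem pv_ft_mid (d : PySem.Dict Int (List Int)) (t : Int × Int × Int) (p : Int)
    (s : PySem.Set (Int × Int × Int)) :
    t ∈ (pvNeigh d p).foldl (fun tri n1 =>
        (pvNeigh d p).foldl (fun tri n2 =>
          if n1 == n2 then tri
          else if (pvNeigh d n2).contains n1 then PySem.Set.add tri (pvSort3 n1 n2 p)
          else tri) tri) s
      ↔ t ∈ s ∨ ∃ n1 ∈ pvNeigh d p, ∃ n2 ∈ pvNeigh d p,
          n1 ≠ n2 ∧ n1 ∈ pvNeigh d n2 ∧ t = pvSort3 n1 n2 p := by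
  rw [pv_foldl_prop_step (fun s => t ∈ s) _
      (fun n1 => ∃ n2 ∈ pvNeigh d p, n1 ≠ n2 ∧ n1 ∈ pvNeigh d n2 ∧ t = pvSort3 n1 n2 p) ?_]
  intro s n1
  exact pv_ft_inner d t p n1 s

theorem pv_mem_findTriangles (d : PySem.Dict Int (List Int)) (t : Int × Int × Int) :
    t ∈ pvFindTriangles d ↔ pvTriCond d t := by
  unfold pvFindTriangles pvTriCond
  rw [pv_foldl_prop_step (fun s => t ∈ s) _
      (fun p => ∃ n1 ∈ pvNeigh d p, ∃ n2 ∈ pvNeigh d p,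
        n1 ≠ n2 ∧ n1 ∈ pvNeigh d n2 ∧ t = pvSort3 n1 n2 p) ?_]
  · simp [PySem.Set.empty, pvNeigh]
  · intro s p
    exact pv_ft_mid d t p s

theorem pv_mem_pvbTris (d : PySem.Dict Int (List Int)) (t : Int × Int × Int) :
    t ∈ pvbTris d ↔ pvTriCond d t := by
  have hps : pvbTri = pvSort3 := rfl
  unfold pvbTris pvTriCond
  simp only [List.mem_flatMap, List.mem_map, List.mem_filter, hps, Bool.and_eq_true,
    bne_iff_ne, ne_eq, List.contains_iff_mem]
  constructor
  · rintro ⟨p, hp, n1, hn1, n2, ⟨hn2, hne, hc⟩, ht⟩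
    exact ⟨p, hp, n1, hn1, n2, hn2, hne, hc, ht.symm⟩
  · rintro ⟨p, hp, n1, hn1, n2, hn2, hne, hc, ht⟩
    exact ⟨p, hp, n1, hn1, n2, ⟨hn2, hne, hc⟩, ht.symm⟩

-- initial dicts: every lookup is the inserted constant
theorem pv_getD_foldl_insert_const {κ ν : Type} [BEq κ] [LawfulBEq κ] [DecidableEq κ] (c : ν) :
    ∀ (l : List κ) (m : PySem.Dict κ ν), (∀ k, m.getD k c = c) →
      ∀ v, (l.foldl (fun m u => m.insert u c) m).getD v c = c := by
  intro l
  induction l with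
  | nil => intro m h v; simpa using h v
  | cons x xs ih =>
    intro m h v
    refine ih _ ?_ v
    intro k
    show (m.insert x c).getD k c = c
    rw [PySem.Dict.getD_insert]
    split_ifs <;> simp [h k]

-- lookup in the node→triangles dict
theorem pv_n2t_inner (t0 y : Int × Int × Int) (v : Int) :
    ∀ (nodes : List Int) (m : PySem.Dict Int (PySem.Set (Int × Int × Int))),
      y ∈ ((nodes.foldl (fun m u =>
            m.modify u PySem.Set.empty (fun s => PySem.Set.add s t0)) m).getD v []) ↔
        y ∈ m.getD v [] ∨ (v ∈ nodes ∧ y = t0) := by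
  intro nodes
  induction nodes with
  | nil => simp
  | cons u us ih =>
    intro m
    rw [List.foldl_cons, ih]
    have hm : (m.modify u PySem.Set.empty (fun s => PySem.Set.add s t0)).getD v [] =
        if v = u then PySem.Set.add (m.getD u []) t0 else m.getD v [] := by
      exact PySem.Dict.getD_modify m u v PySem.Set.empty _
    rw [hm]
    by_cases hv : v = u
    · subst hv; simp [PySem.Set.mem_add]; tauto
    · simp [hv]

theorem pv_mem_n2t (d : PySem.Dict Int (List Int)) (tris : List (Int × Int × Int))
    (v : Int) (y : Int × Int × Int) :
    y ∈ (pvBuildN2T d tris).getD v [] ↔ y ∈ tris ∧ v ∈ pvTriNodes y := by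
  unfold pvBuildN2T
  rw [pv_foldl_prop_step (fun m => y ∈ m.getD v []) _
      (fun t => v ∈ pvTriNodes t ∧ y = t) (fun m t => pv_n2t_inner t y v (pvTriNodes t) m)]
  have hbase : (d.keys.foldl (fun m node => m.insert node PySem.Set.empty)
      PySem.Dict.empty).getD v ([] : List (Int × Int × Int)) = [] :=
    pv_getD_foldl_insert_const PySem.Set.empty d.keys PySem.Dict.empty
      (fun k => PySem.Dict.getD_empty k PySem.Set.empty) v
  rw [hbase]
  simp only [List.not_mem_nil, false_or]
  constructor
  · rintro ⟨t, ht, hv, rfl⟩; exact ⟨ht, hv⟩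
  · rintro ⟨ht, hv⟩; exact ⟨y, ht, hv, rfl⟩

-- under Pre_, every triangle candidate has three distinct nodes
theorem pv_triNodes_sort3 (a b c : Int) : (pvTriNodes (pvSort3 a b c)).Perm [a, b, c] := by
  have hp := PySem.List.sorted_perm [a, b, c] (fun x : Int => x) false
  unfold pvSort3
  rcases h : PySem.List.sorted [a, b, c] (fun x : Int => x) false with _ | ⟨x, _ | ⟨y, _ | ⟨z, rest⟩⟩⟩ <;>
    rw [h] at hp
  · exact absurd hp.length_eq (by simp)
  · exact absurd hp.length_eq (by simp)
  · exact absurd hp.length_eq (by simp)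
  · rcases rest with _ | ⟨w, rest⟩
    · exact hp
    · exact absurd hp.length_eq (by simp)

theorem pv_tri_nodup (adj : List (Int × List Int)) (hPre : Pre_find_010coloring adj)
    (t : Int × Int × Int) (ht : pvTriCond (PySem.Dict.ofList adj) t) :
    (pvTriNodes t).Nodup := by
  obtain ⟨p, hp, n1, hn1, n2, hn2, hne, hc, rfl⟩ := ht
  have hpn1 : p ≠ n1 := by
    rintro rfl
    exact hne ((hPre p hp n2 hn2).2 hn1).symm
  have hpn2 : p ≠ n2 := by
    rintro rfl
    exact hne ((hPre p hp n1 hn1).2 hn2)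
  have hnd : ([n1, n2, p] : List Int).Nodup := by
    simp [hne, Ne.symm hpn1, Ne.symm hpn2]
  exact (pv_triNodes_sort3 n1 n2 p).symm.nodup hnd

-- on a distinct-noded triangle containing v, both "others" computations agree
theorem pv_others_spec (t : Int × Int × Int) (v : Int)
    (hnd : (pvTriNodes t).Nodup) (hv : v ∈ pvTriNodes t) :
    ∃ o1 o2, (pvTriNodes t).filter (fun u => u != v) = [o1, o2] ∧ pvbOthers t v = (o1, o2) := by
  obtain ⟨x, y, z⟩ := t
  have hxy : x ≠ y := by simp [pvTriNodes] at hnd; tauto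
  have hxz : x ≠ z := by simp [pvTriNodes] at hnd; tauto
  have hyz : y ≠ z := by simp [pvTriNodes] at hnd; tauto
  simp only [pvTriNodes, List.mem_cons, List.not_mem_nil, or_false] at hv
  rcases hv with rfl | rfl | rfl
  · exact ⟨y, z, by simp [pvTriNodes, Ne.symm hxy, Ne.symm hxz],
      by simp [pvbOthers, pvbNodes, Ne.symm hxy, Ne.symm hxz]⟩
  · exact ⟨x, z, by simp [pvTriNodes, hxy, Ne.symm hyz],
      by simp [pvbOthers, pvbNodes, hxy, Ne.symm hyz]⟩
  · exact ⟨x, y, by simp [pvTriNodes, hxz, hyz],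
      by simp [pvbOthers, pvbNodes, hxz, hyz]⟩

def pvPF (m : PySem.Dict Int (Option Bool)) (v : Int) (t : Int × Int × Int) : Bool :=
  match (pvTriNodes t).filter (fun x => x != v) with
  | [o1, o2] => m.getD o1 none == some false && m.getD o2 none == some false
  | _ => false

def pvPT (m : PySem.Dict Int (Option Bool)) (v : Int) (t : Int × Int × Int) : Bool :=
  match (pvTriNodes t).filter (fun x => x != v) with
  | [o1, o2] => m.getD o1 none == some true || m.getD o2 none == some true
  | _ => false

theorem pv_foldl_latch2 {β : Type} (pF pT : β → Bool) (f : Bool × Bool → β → Bool × Bool)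
    (hf : ∀ fl t, f fl t = (if pF t then false else fl.1, if pT t then false else fl.2)) :
    ∀ (l : List β) (b : Bool × Bool), l.foldl f b = (b.1 && !l.any pF, b.2 && !l.any pT) := by
  intro l
  induction l with
  | nil => intro b; simp
  | cons x xs ih =>
    intro b
    rw [List.foldl_cons, hf, ih]
    cases hF : pF x <;> cases hT : pT x <;> simp [hF, hT]

theorem pv_canFlags_shape (d : PySem.Dict Int (List Int))
    (n2t : PySem.Dict Int (PySem.Set (Int × Int × Int)))
    (m : PySem.Dict Int (Option Bool)) (v : Int) :
    pvCanFlags d n2t m v =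
      (!(n2t.getD v []).any (pvPF m v),
       !(pvNeigh d v).any (fun nb => m.getD nb none == some true) &&
         !(n2t.getD v []).any (pvPT m v)) := by
  unfold pvCanFlags
  rw [PySem.List.foldl_if_false_eq]
  rw [pv_foldl_latch2 (pvPF m v) (pvPT m v) _ ?_]
  · simp
  · intro fl t
    unfold pvPF pvPT
    rcases h : (pvTriNodes t).filter (fun x => x != v) with _ | ⟨o1, _ | ⟨o2, _ | ⟨o3, r⟩⟩⟩ <;>
      simp

theorem pv_all_not_eq_not_any {β : Type} (L : List β) (q : β → Bool) :
    L.all (fun x => !q x) = !L.any q := by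
  induction L with
  | nil => simp
  | cons x xs ih => simp [Bool.not_or, ih]

theorem pv_any_eq_of_mem_iff {β : Type} (L1 L2 : List β) (h : ∀ t, t ∈ L1 ↔ t ∈ L2)
    (q : β → Bool) : L1.any q = L2.any q := by
  rw [Bool.eq_iff_iff]
  simp only [List.any_eq_true]
  constructor
  · rintro ⟨t, ht, hq⟩; exact ⟨t, (h t).mp ht, hq⟩
  · rintro ⟨t, ht, hq⟩; exact ⟨t, (h t).mpr ht, hq⟩

-- A's flag computation equals B's per-node tests
theorem pv_flags_eq (adj : List (Int × List Int)) (hPre : Pre_find_010coloring adj)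
    (m a : PySem.Dict Int (Option Bool)) (v : Int)
    (hag : ∀ k, m.getD k none = a.getD k none) :
    pvCanFlags (PySem.Dict.ofList adj)
        (pvBuildN2T (PySem.Dict.ofList adj) (pvFindTriangles (PySem.Dict.ofList adj))) m v =
      ((((pvbTris (PySem.Dict.ofList adj)).filter
            (fun t => (pvbNodes t).contains v)).map (fun t => pvbOthers t v)).all
          (fun pr => !(a.getD pr.1 none == some false && a.getD pr.2 none == some false)),
       (((PySem.Dict.ofList adj).getD v []).all (fun u => a.getD u none != some true) &&
        (((pvbTris (PySem.Dict.ofList adj)).filter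
            (fun t => (pvbNodes t).contains v)).map (fun t => pvbOthers t v)).all
          (fun pr => a.getD pr.1 none != some true && a.getD pr.2 none != some true))) := by
  have hbn : pvbNodes = pvTriNodes := rfl
  have hmem : ∀ t, t ∈ (pvBuildN2T (PySem.Dict.ofList adj)
        (pvFindTriangles (PySem.Dict.ofList adj))).getD v [] ↔
      t ∈ (pvbTris (PySem.Dict.ofList adj)).filter (fun t => (pvbNodes t).contains v) := by
    intro t
    rw [pv_mem_n2t, pv_mem_findTriangles, ← pv_mem_pvbTris, List.mem_filter, hbn,
      List.contains_iff_mem]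
  have hspec : ∀ t ∈ (pvbTris (PySem.Dict.ofList adj)).filter
        (fun t => (pvbNodes t).contains v),
      ∃ o1 o2, (pvTriNodes t).filter (fun u => u != v) = [o1, o2] ∧
        pvbOthers t v = (o1, o2) := by
    intro t ht
    rw [List.mem_filter, hbn, List.contains_iff_mem] at ht
    exact pv_others_spec t v
      (pv_tri_nodup adj hPre t ((pv_mem_pvbTris (PySem.Dict.ofList adj) t).mp ht.1)) ht.2
  rw [pv_canFlags_shape]
  refine Prod.ext ?_ ?_
  · show (!_) = _
    rw [pv_any_eq_of_mem_iff _ _ hmem,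
      show (fun pr : Int × Int =>
          !(a.getD pr.1 none == some false && a.getD pr.2 none == some false)) =
        (fun pr : Int × Int =>
          !((fun pr : Int × Int =>
            a.getD pr.1 none == some false && a.getD pr.2 none == some false) pr)) from rfl,
      pv_all_not_eq_not_any, List.any_map]
    congr 1
    refine PySem.List.any_congr_mem ?_
    intro t ht
    obtain ⟨o1, o2, hfil, hoth⟩ := hspec t ht
    unfold pvPF
    rw [hfil]
    simp [Function.comp, hoth, hag]
  · show (_ && _) = (_ && _)
    congr 1
    · show (!_) = _
      rw [show (fun u => a.getD u none != some true) =
          (fun u => !((fun u => a.getD u none == some true) u)) from rfl,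
        pv_all_not_eq_not_any]
      congr 1
      refine PySem.List.any_congr_mem ?_
      intro u _
      rw [hag]
    · show (!_) = _
      rw [pv_any_eq_of_mem_iff _ _ hmem,
        show (fun pr : Int × Int =>
            a.getD pr.1 none != some true && a.getD pr.2 none != some true) =
          (fun pr : Int × Int =>
            !((fun pr : Int × Int =>
              a.getD pr.1 none == some true || a.getD pr.2 none == some true) pr)) from ?_,
        pv_all_not_eq_not_any, List.any_map]
      · congr 1
        refine PySem.List.any_congr_mem ?_
        intro t ht
        obtain ⟨o1, o2, hfil, hoth⟩ := hspec t ht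
        unfold pvPT
        rw [hfil]
        simp [Function.comp, hoth, hag]
      · funext pr
        simp only [Bool.not_or, bne]

-- the two searches agree step by step
theorem pv_dfs_eq (adj : List (Int × List Int)) (hPre : Pre_find_010coloring adj)
    (todo : List Int) :
    ∀ (m : PySem.Dict Int (Option Bool)),
      pvDfsA (PySem.Dict.ofList adj)
          (pvBuildN2T (PySem.Dict.ofList adj) (pvFindTriangles (PySem.Dict.ofList adj))) m todo
        = pvbDfs (PySem.Dict.ofList adj) (pvbTris (PySem.Dict.ofList adj)) m todo := by
  induction todo with
  | nil => intro m; rfl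
  | cons v rest ih =>
    intro m
    have hfl := pv_flags_eq adj hPre m m v (fun _ => rfl)
    simp only [pvDfsA, pvbDfs, hfl, ih]

-- ===== VERDICT (by name: the statement is the Claim_ definition above) =====
theorem find_010coloring_spec : Claim_equal_find_010coloring := by
  intro adj _ hPre
  unfold Spec_find_010coloring find_010coloring find_010coloring_alt
  simp only [pvNeigh]
  rw [pvRunStack_eq_findSome, pv_findSome_singleton, pv_dfs_eq adj hPre]
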